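-- pv_equiv track=rewrite | github.com/LeHuyHongNhat/Python-PTIT | Py02055_SoNguyenToLonNhatTrongMaTran.py | find_max_primes
-- ===== SOURCE A (Python) =====
-- from math import sqrt
--
-- def is_prime(x):
--     if x < 2:
--         return False
--     if x == 2:
--         return True
--     if x % 2 == 0:
--         return False
--     for i in range(3, int(sqrt(x)) + 1, 2):
--         if x % i == 0:
--             return False
--     return True
--
-- def find_max_primes(mtr):
--     max_pr = -1
--     poss = []
--
--     for i, row in enumerate(mtr):
--         for j, value in enumerate(row):
--             if is_prime(value):
--                 if value > max_pr:
--                     max_pr = value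
--                     poss = [(i, j)]
--                 elif value == max_pr:
--                     poss.append((i, j))
--
--     return max_pr, poss
-- ===== SOURCE B (Python) =====
-- def _is_prime(x):
--     if x < 2:
--         return False
--     d = 2
--     while d * d <= x:
--         if x % d == 0:
--             return False
--         d += 1
--     return True
--
-- def find_max_primes(mtr):
--     primes = [(v, i, j) for i, row in enumerate(mtr) for j, v in enumerate(row) if _is_prime(v)]
--     if not primes:
--         return -1, []
--     m = max(v for v, _, _ in primes)
--     return m, [(i, j) for v, i, j in primes if v == m]
-- ===== Notes on version B (the rewrite author's own statement) =====
-- stated objective: simpler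
-- what changed: B first materialises the row-major list (value, i, j) of prime cells and then computes the answer with a separate max pass plus a filter, instead of A's fused running-max/positions merge inside the nested scan; B's primality test loops over every d while d*d <= x instead of A's odd-step trial loop bounded by int(sqrt(x)).
import Mathlib
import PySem

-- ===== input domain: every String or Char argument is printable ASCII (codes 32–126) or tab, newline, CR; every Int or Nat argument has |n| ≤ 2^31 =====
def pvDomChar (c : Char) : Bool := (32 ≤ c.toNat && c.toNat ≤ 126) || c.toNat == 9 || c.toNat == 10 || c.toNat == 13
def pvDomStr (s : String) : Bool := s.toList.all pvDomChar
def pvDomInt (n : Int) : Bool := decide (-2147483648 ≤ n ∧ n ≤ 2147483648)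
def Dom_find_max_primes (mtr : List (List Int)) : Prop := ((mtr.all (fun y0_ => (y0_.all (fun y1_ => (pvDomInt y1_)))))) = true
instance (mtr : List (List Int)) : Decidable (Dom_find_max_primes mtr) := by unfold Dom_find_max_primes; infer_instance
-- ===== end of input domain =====

-- B replaces A's fused running-max/positions scan by: materialise the row-major list of
-- prime cells, then a separate max pass and a filter; its primality test loops while
-- d*d <= x over all d instead of odd d up to an int(sqrt(x)) bound.

-- ===== PORT A =====
-- 'for i in range(3, int(sqrt(x)) + 1, 2): if x % i == 0: return False' — the range is
-- materialised and walked with early exit.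
def pyTrialA (x : Int) : List Int → Bool
  | [] => true
  | i :: rest => if x % i = 0 then false else pyTrialA x rest

-- int(sqrt(x)) : CPython's float sqrt is correctly rounded; for 0 ≤ x ≤ 2^31 (the stated
-- domain Dom_) it truncates to exactly Nat.sqrt x, so this transliteration is exact there.
def pyIsPrime (x : Int) : Bool :=
  if x < 2 then false
  else if x = 2 then true
  else if x % 2 = 0 then false
  else pyTrialA x (PySem.List.pyRange 3 ((Nat.sqrt x.toNat : Int) + 1) 2)

def find_max_primes (mtr : List (List Int)) : Int × (List (Int × Int)) :=
  (PySem.List.enumerate mtr 0).foldl (fun st p =>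
    (PySem.List.enumerate p.2 0).foldl (fun st q =>
      if pyIsPrime q.2 then
        if q.2 > st.1 then (q.2, [(p.1, q.1)])
        else if q.2 = st.1 then (st.1, st.2 ++ [(p.1, q.1)])
        else st
      else st) st) (-1, [])

-- ===== PORT B =====
-- 'while d * d <= x: …; d += 1' — fuel recursion; x.toNat steps always suffice since the
-- loop runs at most sqrt x times (fuel exhaustion is never reached, see altLoop_spec below).
def altLoop (x : Int) : Nat → Int → Bool
  | 0, _ => true
  | fuel + 1, d =>
    if d * d ≤ x then
      if x % d = 0 then false else altLoop x fuel (d + 1)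
    else true

def altIsPrime (x : Int) : Bool :=
  if x < 2 then false else altLoop x x.toNat 2

-- primes = [(v, i, j) for i, row in enumerate(mtr) for j, v in enumerate(row) if _is_prime(v)]
def primesOf (mtr : List (List Int)) : List (Int × Int × Int) :=
  (PySem.List.enumerate mtr 0).flatMap (fun p =>
    ((PySem.List.enumerate p.2 0).filter (fun q => altIsPrime q.2)).map (fun q => (q.2, p.1, q.1)))

def find_max_primes_alt (mtr : List (List Int)) : Int × (List (Int × Int)) :=
  match primesOf mtr with
  | [] => (-1, [])
  | t :: ts =>
    -- m = max(v for v, _, _ in primes): first value, then replace when strictly larger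
    let m := ts.foldl (fun acc u => if u.1 > acc then u.1 else acc) t.1
    (m, ((t :: ts).filter (fun u => u.1 == m)).map (fun u => (u.2.1, u.2.2)))

-- ===== PRECONDITION & SPEC =====
def Spec_find_max_primes (mtr : List (List Int)) (out : Int × (List (Int × Int))) : Prop := out = find_max_primes_alt mtr
instance (mtr : List (List Int)) (out : Int × (List (Int × Int))) : Decidable (Spec_find_max_primes mtr out) := by unfold Spec_find_max_primes; infer_instance

-- ===== CLAIM (what is proved, stated in full; the proofs are below) =====
def Claim_equal_find_max_primes : Prop := ∀ (mtr : List (List Int)), Dom_find_max_primes mtr → Spec_find_max_primes mtr (find_max_primes mtr)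

-- ===== LEMMAS AND PROOFS =====

-- ---- primality: both tests decide '∀ e ≥ 2, e*e ≤ x → x % e ≠ 0' ----

theorem altLoop_spec (x : Int) : ∀ (fuel : Nat) (d : Int), 2 ≤ d → x + 1 ≤ (fuel : Int) + d →
    (altLoop x fuel d = true ↔ ∀ e : Int, d ≤ e → e * e ≤ x → x % e ≠ 0) := by
  intro fuel
  induction fuel with
  | zero =>
    intro d hd hfuel
    simp only [altLoop, true_iff]
    intro e hde hee
    exfalso
    have h1 : d * d ≤ e * e := mul_le_mul hde hde (by omega) (by omega)
    have h2 : 2 * d ≤ d * d := by nlinarith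
    omega
  | succ fuel ih =>
    intro d hd hfuel
    simp only [altLoop]
    by_cases hdd : d * d ≤ x
    · simp only [hdd, if_true]
      by_cases hmod : x % d = 0
      · simp only [hmod, if_true]
        constructor
        · intro h; exact absurd h (by simp)
        · intro h; exact absurd hmod (h d le_rfl hdd)
      · simp only [hmod, if_false]
        rw [ih (d + 1) (by omega) (by omega)]
        constructor
        · intro h e hde hee
          rcases eq_or_lt_of_le hde with rfl | hlt
          · exact hmod
          · exact h e (by omega) hee
        · intro h e hde hee; exact h e (by omega) hee
    · simp only [hdd, if_false, true_iff]
      intro e hde hee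
      exfalso
      have : d * d ≤ e * e := mul_le_mul hde hde (by omega) (by omega)
      omega

theorem trialA_iff (x : Int) (l : List Int) :
    pyTrialA x l = true ↔ ∀ i ∈ l, x % i ≠ 0 := by
  induction l with
  | nil => simp [pyTrialA]
  | cons i rest ih =>
    by_cases h : x % i = 0
    · simp only [pyTrialA, if_pos h]
      constructor
      · intro hf; exact absurd hf (by simp)
      · intro hr; exact absurd h (hr i (List.mem_cons_self ..))
    · simp only [pyTrialA, if_neg h, ih]
      constructor
      · intro hr j hj
        rcases List.mem_cons.mp hj with rfl | hj'
        · exact h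
        · exact hr j hj'
      · intro hr j hj; exact hr j (List.mem_cons_of_mem _ hj)

theorem noSmallDiv_iff_odd (x : Int) (hx : 3 ≤ x) (hodd : ¬ x % 2 = 0) :
    ((∀ i ∈ PySem.List.pyRange 3 ((Nat.sqrt x.toNat : Int) + 1) 2, x % i ≠ 0) ↔
      ∀ e : Int, 2 ≤ e → e * e ≤ x → x % e ≠ 0) := by
  have hx0 : (x.toNat : Int) = x := Int.toNat_of_nonneg (by omega)
  constructor
  · intro h e he hee hmod
    have hdvd : e ∣ x := Int.dvd_of_emod_eq_zero hmod
    by_cases heven : (2 : Int) ∣ e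
    · exact hodd (Int.emod_eq_zero_of_dvd (dvd_trans heven hdvd))
    · -- e is odd, 3 ≤ e, e ≤ sqrt x: it is in the trial range
      have he3 : 3 ≤ e := by omega
      have hsq : e ≤ (Nat.sqrt x.toNat : Int) := by
        by_contra hns
        have h1 : ((Nat.sqrt x.toNat : Int) + 1) ≤ e := by omega
        have h2 : (x.toNat : Int) < ((Nat.sqrt x.toNat : Int) + 1) * ((Nat.sqrt x.toNat : Int) + 1) := by
          exact_mod_cast Nat.lt_succ_sqrt x.toNat
        have h3 : ((Nat.sqrt x.toNat : Int) + 1) * ((Nat.sqrt x.toNat : Int) + 1) ≤ e * e :=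
          mul_le_mul h1 h1 (by positivity) (by omega)
        omega
      refine absurd hmod (h e ?_)
      rw [PySem.List.mem_pyRange_iff_of_pos (by norm_num)]
      refine ⟨he3, by omega, by omega⟩
  · intro h i hi
    rw [PySem.List.mem_pyRange_iff_of_pos (by norm_num)] at hi
    obtain ⟨h3, hlt, _⟩ := hi
    refine h i (by omega) ?_
    have h5 : (i.toNat : Int) = i := Int.toNat_of_nonneg (by omega)
    have h6 : i.toNat ≤ Nat.sqrt x.toNat := by omega
    have h7 := Nat.le_sqrt.mp h6
    have h8 : (i.toNat : Int) * (i.toNat : Int) ≤ (x.toNat : Int) := by exact_mod_cast h7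
    rw [h5, hx0] at h8
    exact h8

theorem isPrime_eq (x : Int) : pyIsPrime x = altIsPrime x := by
  by_cases h2 : x < 2
  · simp [pyIsPrime, altIsPrime, h2]
  · by_cases he2 : x = 2
    · subst he2; decide
    · have hx3 : 3 ≤ x := by omega
      have hBiff := altLoop_spec x x.toNat 2 (by norm_num) (by omega)
      by_cases hev : x % 2 = 0
      · -- both sides false: e = 2 divides x
        have hB : altLoop x x.toNat 2 = false := by
          cases hb : altLoop x x.toNat 2
          · rfl
          · exact absurd hev (hBiff.mp hb 2 le_rfl (by omega))
        simp [pyIsPrime, altIsPrime, h2, he2, hev, hB]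
      · have hAiff := (trialA_iff x _).trans (noSmallDiv_iff_odd x hx3 hev)
        simp only [pyIsPrime, altIsPrime, if_neg h2, if_neg he2, if_neg hev]
        rw [Bool.eq_iff_iff, hAiff, hBiff]

-- ---- the fold: A's fused merge over the flattened prime cells ----

def pvMerge (st : Int × List (Int × Int)) (t : Int × Int × Int) : Int × List (Int × Int) :=
  if t.1 > st.1 then (t.1, [t.2])
  else if t.1 = st.1 then (st.1, st.2 ++ [t.2])
  else st

def pvMx (l : List (Int × Int × Int)) : Int := l.foldl (fun a u => max a u.1) (-1)

theorem foldl_flatMap_eq {α β γ : Type} (g : α → List β) (f : γ → β → γ) :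
    ∀ (l : List α) (init : γ), (l.flatMap g).foldl f init = l.foldl (fun a x => (g x).foldl f a) init := by
  intro l
  induction l with
  | nil => intro init; rfl
  | cons x xs ih => intro init; simp [List.flatMap_cons, List.foldl_append, ih]

theorem inner_row_eq (l : List (Int × Int)) (st : Int × List (Int × Int)) (p1 : Int) :
    l.foldl (fun st q =>
        if pyIsPrime q.2 then
          if q.2 > st.1 then (q.2, [(p1, q.1)])
          else if q.2 = st.1 then (st.1, st.2 ++ [(p1, q.1)])
          else st
        else st) st
    = ((l.filter (fun q => altIsPrime q.2)).map (fun q => (q.2, p1, q.1))).foldl pvMerge st := by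
  induction l generalizing st with
  | nil => rfl
  | cons q l ih =>
    simp only [List.foldl_cons, List.filter_cons]
    rw [isPrime_eq q.2]
    by_cases h : altIsPrime q.2
    · rw [if_pos h, if_pos h, List.map_cons, List.foldl_cons]
      have hstep : (if q.2 > st.1 then (q.2, [(p1, q.1)])
          else if q.2 = st.1 then (st.1, st.2 ++ [(p1, q.1)]) else st)
          = pvMerge st (q.2, p1, q.1) := rfl
      rw [hstep, ih]
    · rw [if_neg h, if_neg h, ih]

theorem find_max_primes_eq_fold (mtr : List (List Int)) :
    find_max_primes mtr = (primesOf mtr).foldl pvMerge (-1, []) := by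
  unfold find_max_primes primesOf
  rw [foldl_flatMap_eq]
  exact List.foldl_ext _ _ _ (fun st p _ => inner_row_eq (PySem.List.enumerate p.2 0) st p.1)

theorem mx_ge_init : ∀ (l : List (Int × Int × Int)) (a : Int), a ≤ l.foldl (fun a u => max a u.1) a := by
  intro l
  induction l with
  | nil => intro a; simp
  | cons u us ih => intro a; exact le_trans (le_max_left a u.1) (ih (max a u.1))

theorem mx_ge_mem (l : List (Int × Int × Int)) (u : Int × Int × Int) (hu : u ∈ l) (a : Int) :
    u.1 ≤ l.foldl (fun a v => max a v.1) a := by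
  induction l generalizing a with
  | nil => cases hu
  | cons v vs ih =>
    rcases List.mem_cons.mp hu with rfl | h
    · exact le_trans (le_max_right a u.1) (mx_ge_init vs _)
    · exact ih h _

theorem mem_le_pvMx (l : List (Int × Int × Int)) (u : Int × Int × Int) (hu : u ∈ l) :
    u.1 ≤ pvMx l := mx_ge_mem l u hu (-1)

theorem pvMx_append (l : List (Int × Int × Int)) (t : Int × Int × Int) :
    pvMx (l ++ [t]) = max (pvMx l) t.1 := by
  simp [pvMx, List.foldl_append]

theorem merge_fold_spec (l : List (Int × Int × Int)) :
    l.foldl pvMerge (-1, []) = (pvMx l, (l.filter (fun u => u.1 == pvMx l)).map (fun u => u.2)) := by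
  induction l using List.reverseRecOn with
  | nil => simp [pvMx]
  | append_singleton l t ih =>
    rw [List.foldl_append, ih, List.foldl_cons, List.foldl_nil, pvMx_append, List.filter_append]
    simp only [pvMerge]
    rcases lt_trichotomy (pvMx l) t.1 with hlt | heq | hgt
    · have hmax : max (pvMx l) t.1 = t.1 := max_eq_right (le_of_lt hlt)
      rw [hmax, if_pos (by exact hlt)]
      have hnil : l.filter (fun u => u.1 == t.1) = [] := by
        rw [List.filter_eq_nil_iff]
        intro u hu
        have hle := mem_le_pvMx l u hu
        simp only [beq_iff_eq]
        omega
      rw [hnil]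
      simp
    · have hmax : max (pvMx l) t.1 = pvMx l := max_eq_left (le_of_eq heq.symm)
      rw [hmax, if_neg (by omega), if_pos (by omega)]
      have hft : [t].filter (fun u => u.1 == pvMx l) = [t] := by simp [heq]
      rw [hft]
      simp
    · have hmax : max (pvMx l) t.1 = pvMx l := max_eq_left (le_of_lt hgt)
      rw [hmax, if_neg (by omega), if_neg (by omega)]
      have hft : [t].filter (fun u => u.1 == pvMx l) = [] := by simp; omega
      rw [hft]
      simp

theorem primesOf_ge_two (mtr : List (List Int)) (t : Int × Int × Int) (ht : t ∈ primesOf mtr) : 2 ≤ t.1 := by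
  unfold primesOf at ht
  rw [List.mem_flatMap] at ht
  obtain ⟨p, _, hp⟩ := ht
  rw [List.mem_map] at hp
  obtain ⟨q, hq, rfl⟩ := hp
  rw [List.mem_filter] at hq
  have := hq.2
  unfold altIsPrime at this
  by_cases h : q.2 < 2
  · rw [if_pos h] at this; cases this
  · omega

theorem ifmax_eq_max : ∀ (l : List (Int × Int × Int)) (a : Int),
    l.foldl (fun acc u => if u.1 > acc then u.1 else acc) a = l.foldl (fun a u => max a u.1) a := by
  intro l
  induction l with
  | nil => intro a; rfl
  | cons u us ih =>
    intro a
    simp only [List.foldl_cons]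
    have h : (if u.1 > a then u.1 else a) = max a u.1 := by split <;> omega
    rw [h, ih]

-- ===== VERDICT (by name: the statement is the Claim_ definition above) =====
theorem find_max_primes_spec : Claim_equal_find_max_primes := by
  intro mtr _
  unfold Spec_find_max_primes
  rw [find_max_primes_eq_fold, merge_fold_spec]
  unfold find_max_primes_alt
  cases hp : primesOf mtr with
  | nil => simp [pvMx]
  | cons t ts =>
    simp only
    have h2 : 2 ≤ t.1 := primesOf_ge_two mtr t (by rw [hp]; exact List.mem_cons_self ..)
    have hm : ts.foldl (fun acc u => if u.1 > acc then u.1 else acc) t.1 = pvMx (t :: ts) := by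
      rw [ifmax_eq_max]
      unfold pvMx
      simp only [List.foldl_cons]
      rw [max_eq_right (by omega : (-1 : Int) ≤ t.1)]
    rw [hm]
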